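-- pv_equiv track=rewrite | github.com/magomi/aoc-2020 | 06/python/customs.py | calc_second
-- ===== SOURCE A (Python) =====
-- def calc_second(group_data):
--     data = set()
--     for c in group_data[0]:
--         data.add(c)
--     for line in group_data[1:]:
--         check_data = data.copy()
--         for c in check_data:
--             if not c in line:
--                 data.remove(c)
--     return data
-- ===== SOURCE B (Python) =====
-- def calc_second(group_data):
--     # Counting approach: one pass tallies, per line, each distinct character;
--     # a character is common to all lines iff its tally equals the number of lines.
--     n = len(group_data)
--     counts = {}
--     for line in group_data:
--         for c in set(line):
--             counts[c] = counts.get(c, 0) + 1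
--     return {c for c in group_data[0] if counts.get(c, 0) == n}
-- ===== Notes on version B (the rewrite author's own statement) =====
-- stated objective: alternative
-- what changed: B replaces A's repeated copy-the-set-and-remove-members-missing-from-the-current-line passes by a counting algorithm: one dictionary pass tallies each distinct character per line, then a character of the first line is kept iff its tally equals the number of lines.
import Mathlib
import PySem

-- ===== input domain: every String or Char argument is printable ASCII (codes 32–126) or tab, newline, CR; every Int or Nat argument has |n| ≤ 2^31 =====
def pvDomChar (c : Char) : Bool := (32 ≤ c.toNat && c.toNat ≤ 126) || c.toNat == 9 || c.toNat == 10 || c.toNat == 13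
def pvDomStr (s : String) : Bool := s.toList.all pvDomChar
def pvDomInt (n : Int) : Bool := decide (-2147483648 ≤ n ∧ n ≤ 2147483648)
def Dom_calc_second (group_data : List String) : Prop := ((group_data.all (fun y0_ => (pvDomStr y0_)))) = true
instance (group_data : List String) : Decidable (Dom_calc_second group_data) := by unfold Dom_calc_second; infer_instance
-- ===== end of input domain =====

-- B computes the same common-character set by a counting pass (tally each distinct
-- character per line, keep the first line's characters whose tally equals the number
-- of lines) instead of A's repeated copy-then-remove membership passes; equal return
-- value on every non-empty group_data.

-- ===== PORT A =====
-- A's set elements are 1-char strings; the ports carry them as Char and wrap each as a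
-- 1-char String at the return (exact: 'c in line' for a 1-char c is char membership).
-- Python's data.remove(c) is ported as Set.discard: c is drawn from check_data, a copy of
-- data from which this loop only removes, so c is always present and KeyError never occurs.
def calc_second (group_data : List String) : List String :=
  match group_data with
  | [] => []   -- Python raises IndexError here (group_data[0]); excluded by Pre_
  | line0 :: rest =>
    -- data = set(); for c in group_data[0]: data.add(c)
    let data : PySem.Set Char := line0.toList.foldl PySem.Set.add PySem.Set.empty
    -- for line in group_data[1:]: check_data = data.copy(); for c in check_data: if not c in line: data.remove(c)
    let data := rest.foldl (fun data line =>
      let check_data := data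
      check_data.foldl (fun d c => if c ∈ line.toList then d else PySem.Set.discard d c) data) data
    data.map (fun c => String.ofList [c])

-- ===== PORT B =====
-- counts is a dict Char → Int; the set comprehension over group_data[0] is ported as
-- the set of the filtered character list (exact: same elements, first-occurrence order).
def calc_second_alt (group_data : List String) : List String :=
  -- n = len(group_data)
  let n : Int := (group_data.length : Int)
  -- counts = {}; for line in group_data: for c in set(line): counts[c] = counts.get(c, 0) + 1
  let counts : PySem.Dict Char Int := group_data.foldl (fun d line =>
    (PySem.Set.ofList line.toList).foldl (fun d c => d.insert c (d.getD c 0 + 1)) d)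
    PySem.Dict.empty
  match group_data with
  | [] => []   -- Python raises IndexError here (group_data[0]); excluded by Pre_
  | line0 :: _ =>
    -- return {c for c in group_data[0] if counts.get(c, 0) == n}
    (PySem.Set.ofList (line0.toList.filter (fun c => counts.getD c 0 == n))).map
      (fun c => String.ofList [c])

-- ===== PRECONDITION & SPEC =====
-- Both A and B raise IndexError on empty group_data (group_data[0]); only that input is excluded.
def Pre_calc_second (group_data : List String) : Prop := group_data ≠ []
instance (group_data : List String) : Decidable (Pre_calc_second group_data) := by
  unfold Pre_calc_second; infer_instance
def pvWitness_calc_second : List String := ["abc", "cab"]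
def Spec_calc_second (group_data : List String) (out : List String) : Prop := out = calc_second_alt group_data
instance (group_data : List String) (out : List String) : Decidable (Spec_calc_second group_data out) := by unfold Spec_calc_second; infer_instance

-- ===== CLAIM (what is proved, stated in full; the proofs are below) =====
def Claim_equal_calc_second : Prop := ∀ (group_data : List String), Dom_calc_second group_data → Pre_calc_second group_data → Spec_calc_second group_data (calc_second group_data)

-- ===== LEMMAS AND PROOFS =====

-- A's inner loop over a copy of d0, discarding the elements not in L, is a filter of d0.
theorem foldl_discard_eq_filter (cs d0 L : List Char) :
    cs.foldl (fun d c => if c ∈ L then d else PySem.Set.discard d c) d0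
      = d0.filter (fun x => decide (x ∈ L) || !cs.contains x) := by
  induction cs generalizing d0 with
  | nil => simp
  | cons c cs ih =>
    simp only [List.foldl_cons]
    by_cases hc : c ∈ L
    · rw [if_pos hc, ih]
      refine List.filter_congr (fun x _ => ?_)
      by_cases hx : x ∈ L
      · simp [hx]
      · have hxc : x ≠ c := fun h => hx (h ▸ hc)
        simp [hx, hxc]
    · rw [if_neg hc, ih, PySem.Set.discard, List.filter_filter]
      refine List.filter_congr (fun x _ => ?_)
      by_cases hxc : x = c
      · subst hxc; simp [hc]
      · simp [hxc]

-- One pass of A's per-line loop on a duplicate-free accumulator equals set intersection.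
theorem step_eq_inter (s : PySem.Set Char) (hs : s.Nodup) (L : List Char) :
    s.foldl (fun d c => if c ∈ L then d else PySem.Set.discard d c) s
      = PySem.Set.inter s (PySem.Set.ofList L) := by
  rw [foldl_discard_eq_filter]
  unfold PySem.Set.inter
  refine List.filter_congr (fun x hx => ?_)
  simp [PySem.Set.contains, PySem.Set.mem_ofList, hx]

-- A's line loop is a running intersection.
theorem fold_lines_eq (rest : List String) (s : PySem.Set Char) (hnd : s.Nodup) :
    rest.foldl (fun data line =>
        data.foldl (fun d c => if c ∈ line.toList then d else PySem.Set.discard d c) data) s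
      = rest.foldl (fun s line => PySem.Set.inter s (PySem.Set.ofList line.toList)) s := by
  induction rest generalizing s with
  | nil => rfl
  | cons line rest ih =>
    simp only [List.foldl_cons]
    rw [step_eq_inter s hnd]
    exact ih _ (List.Nodup.filter _ hnd)

-- A running intersection keeps exactly the elements present in every line.
theorem foldl_inter_eq_filter (rest : List String) (s : PySem.Set Char) :
    rest.foldl (fun s line => PySem.Set.inter s (PySem.Set.ofList line.toList)) s
      = s.filter (fun c => rest.all (fun line => line.toList.contains c)) := by
  induction rest generalizing s with
  | nil => simp
  | cons line rest ih =>
    simp only [List.foldl_cons, ih]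
    unfold PySem.Set.inter
    rw [List.filter_filter]
    refine List.filter_congr (fun x _ => ?_)
    simp [PySem.Set.contains, PySem.Set.mem_ofList, Bool.and_comm]

-- In a duplicate-free list (a Set), count is the membership indicator.
theorem count_set_ofList (l : List Char) (c : Char) :
    (PySem.Set.ofList l).count c = if c ∈ l then 1 else 0 := by
  by_cases h : c ∈ l
  · rw [if_pos h]
    exact List.count_eq_one_of_mem (PySem.Set.nodup_ofList l) ((PySem.Set.mem_ofList l c).mpr h)
  · rw [if_neg h]
    exact List.count_eq_zero_of_not_mem (fun hm => h ((PySem.Set.mem_ofList l c).mp hm))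

-- B's tally dictionary counts, for each character, the lines containing it.
theorem getD_counts (lines : List String) (d : PySem.Dict Char Int) (c : Char) :
    (lines.foldl (fun d line =>
        (PySem.Set.ofList line.toList).foldl (fun d c => d.insert c (d.getD c 0 + 1)) d) d).getD c 0
      = d.getD c 0 + (lines.countP (fun line => line.toList.contains c) : Int) := by
  induction lines generalizing d with
  | nil => simp
  | cons line rest ih =>
    simp only [List.foldl_cons, ih, PySem.Dict.getD_foldl_insert_add_one, count_set_ofList]
    rw [List.countP_cons]
    by_cases h : c ∈ line.toList
    · simp [h]; ring
    · simp [h]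

-- set(filter) = filter(set): Set.ofList commutes with filtering.
theorem filter_add (s : List Char) (x : Char) (p : Char → Bool) :
    (PySem.Set.add s x).filter p
      = if p x then PySem.Set.add (s.filter p) x else s.filter p := by
  simp only [PySem.Set.add, PySem.Set.contains, List.contains_eq_mem]
  by_cases hp : p x
  · by_cases hx : x ∈ s
    · have hx' : x ∈ s.filter p := List.mem_filter.mpr ⟨hx, hp⟩
      simp [hx, hx', hp]
    · have hx' : x ∉ s.filter p := fun h => hx (List.mem_filter.mp h).1
      simp [hx, hx', hp, List.filter_append]
  · by_cases hx : x ∈ s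
    · simp [hx, hp]
    · simp [hx, hp, List.filter_append]

theorem foldl_add_filter (l : List Char) (p : Char → Bool) (s : List Char) :
    (l.filter p).foldl PySem.Set.add (s.filter p) = (l.foldl PySem.Set.add s).filter p := by
  induction l generalizing s with
  | nil => simp
  | cons x l ih =>
    simp only [List.filter_cons, List.foldl_cons, ← ih, filter_add]
    by_cases hp : p x
    · simp [hp]
    · simp [hp]

theorem ofList_filter (l : List Char) (p : Char → Bool) :
    PySem.Set.ofList (l.filter p) = (PySem.Set.ofList l).filter p := by
  have := foldl_add_filter l p []
  simpa [PySem.Set.ofList_eq_foldl] using this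

-- 'every line passes q' iff the tally k+1 equals the line count m+1.
theorem all_eq_beq_count (rest : List String) (q : String → Bool) :
    rest.all q = (((rest.countP q : Int) + 1) == (((rest.length : Nat) : Int) + 1)) := by
  by_cases h : rest.all q = true
  · rw [h, List.countP_eq_length.mpr (by simpa [List.all_eq_true] using h)]
    simp
  · have hne : rest.countP q ≠ rest.length := fun he =>
      h (by simpa [List.all_eq_true] using List.countP_eq_length.mp he)
    simp only [Bool.not_eq_true] at h
    rw [h]
    symm
    simp only [beq_eq_false_iff_ne, ne_eq]
    omega

-- ===== VERDICT (by name: the statement is the Claim_ definition above) =====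
theorem calc_second_spec : Claim_equal_calc_second := by
  intro group_data _ hpre
  unfold Spec_calc_second
  match group_data with
  | [] => exact absurd rfl hpre
  | line0 :: rest =>
    unfold calc_second calc_second_alt
    simp only
    rw [show line0.toList.foldl PySem.Set.add PySem.Set.empty = PySem.Set.ofList line0.toList
          from rfl,
        fold_lines_eq rest _ (PySem.Set.nodup_ofList _),
        foldl_inter_eq_filter, ofList_filter]
    congr 1
    refine List.filter_congr (fun c hc => ?_)
    have hc0 : c ∈ line0.toList := (PySem.Set.mem_ofList _ _).mp hc
    rw [getD_counts]
    simp only [PySem.Dict.getD_empty, List.contains_eq_mem, List.countP_cons, hc0,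
      decide_true, if_pos, List.length_cons, zero_add]
    exact all_eq_beq_count rest _
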